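-- pv_equiv track=rewrite | github.com/DrDabbidy/wordle-guesser | main.py | best_word_freqs
-- ===== SOURCE A (Python) =====
-- def get_freqs(word_list: list) -> dict:
--     alphabet = 'abcdefghijklmnopqrstuvwxyz'
--     freqs = {}
--
--     for i in range(26):
--         char = alphabet[i]
--         for word in word_list:
--             if char in freqs:
--                 freqs[char] = freqs[char] + word.count(char)
--             else:
--                 freqs[char] = word.count(char)
--
--     return freqs
--
-- def score_word_freqs(word: str, freqs: dict) -> float:
--     """
--     Return a relative score for a give word based on
--     the frequency of letters in the word list.
--     """
--     word = ''.join(set(word))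
--     score = 0
--     for char in word:
--         score += freqs[char]
--     return score
--
-- def best_word_freqs(word_list: list) -> str:
--     """
--     Return the best first guess in the word list.
--     """
--     freqs = get_freqs(word_list)
--     best_word = ''
--     best_score = 0
--
--     for word in word_list:
--         score = score_word_freqs(word, freqs)
--         if score > best_score:
--             best_word = word
--             best_score = score
--
--     return best_word
-- ===== SOURCE B (Python) =====
-- def best_word_freqs(word_list: list) -> str:
--     """
--     Return the best first guess in the word list.
--     """
--     freqs = {}
--     for word in word_list:
--         for c in word:
--             freqs[c] = freqs.get(c, 0) + 1
--     ranked = sorted(word_list, key=lambda w: sum(freqs[c] for c in set(w)), reverse=True)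
--     return ranked[0] if ranked else ''
-- ===== Notes on version B (the rewrite author's own statement) =====
-- stated objective: faster
-- what changed: Replaces the 26-pass per-letter frequency build (one str.count scan of every word per letter) and the max-tracking scan with a single pass over all characters building the counts and a stable reverse sort by score whose head is the answer.
import Mathlib
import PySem

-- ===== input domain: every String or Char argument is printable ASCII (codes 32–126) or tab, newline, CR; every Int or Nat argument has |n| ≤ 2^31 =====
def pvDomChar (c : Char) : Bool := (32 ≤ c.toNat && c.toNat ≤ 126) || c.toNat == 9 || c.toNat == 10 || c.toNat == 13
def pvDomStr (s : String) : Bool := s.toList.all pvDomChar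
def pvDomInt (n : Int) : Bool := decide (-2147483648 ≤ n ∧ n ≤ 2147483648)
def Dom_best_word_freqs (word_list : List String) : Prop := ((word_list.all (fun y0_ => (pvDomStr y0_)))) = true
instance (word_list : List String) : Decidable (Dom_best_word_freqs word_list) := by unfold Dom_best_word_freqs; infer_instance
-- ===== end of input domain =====

-- B replaces A's 26-pass letter-frequency build and max-tracking scan by a one-pass character count
-- and a stable reverse sort by score whose head is the answer (objective: alternative).

-- ===== PORT A =====
def get_freqs (word_list : List String) : PySem.Dict Char Int :=
  (PySem.List.pyRange 0 26 1).foldl (fun freqs i =>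
    -- char = alphabet[i]; i ∈ range(26) is always in range, so the defaulted index is exact
    let char := PySem.List.pyGetD "abcdefghijklmnopqrstuvwxyz".toList i 'a'
    word_list.foldl (fun f word =>
      match f.get? char with
      | some v => f.insert char (v + (PySem.Str.count word (String.ofList [char]) : Int))
      | none   => f.insert char ((PySem.Str.count word (String.ofList [char]) : Int))) freqs)
  PySem.Dict.empty

-- ''.join(set(word)) then summing freqs[char]: Python's set order is unspecified, but both the sum
-- and the KeyError condition are order-independent, so first-occurrence order is exact.
-- none = KeyError (a character absent from freqs); excluded by Pre_.
def score_word_freqs (word : String) (freqs : PySem.Dict Char Int) : Option Int :=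
  (PySem.Set.ofList word.toList).foldl
    (fun s c => match s, freqs.get? c with
      | some acc, some v => some (acc + v)
      | _, _ => none) (some 0)

def best_word_freqs (word_list : List String) : String :=
  let freqs := get_freqs word_list
  (word_list.foldl (fun (st : String × Int) word =>
      match score_word_freqs word freqs with
      | some score => if score > st.2 then (word, score) else st
      | none => st      -- Python raises KeyError here; excluded by Pre_
    ) ("", 0)).1

-- ===== PORT B =====
def altFreqs (word_list : List String) : PySem.Dict Char Int :=
  word_list.foldl (fun f word =>
    word.toList.foldl (fun f c => f.insert c (f.getD c 0 + 1)) f) PySem.Dict.empty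

-- sum(freqs[c] for c in set(w)): every character of w was counted into freqs, so the lookup never
-- raises and the defaulted getD is exact.
def altScore (freqs : PySem.Dict Char Int) (w : String) : Int :=
  (PySem.Set.ofList w.toList).foldl (fun s c => s + freqs.getD c 0) 0

def best_word_freqs_alt (word_list : List String) : String :=
  let freqs := altFreqs word_list
  match PySem.List.sorted word_list (fun w => altScore freqs w) true with
  | [] => ""
  | w :: _ => w

-- ===== PRECONDITION & SPEC =====
-- Pre_ excludes exactly the inputs on which A raises KeyError: a word containing a character
-- outside 'a'..'z' is scored against a frequency table keyed only by 'a'..'z'.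
def Pre_best_word_freqs (word_list : List String) : Prop :=
  (word_list.all (fun w => w.toList.all (fun c => decide ('a' ≤ c) && decide (c ≤ 'z')))) = true
instance (word_list : List String) : Decidable (Pre_best_word_freqs word_list) := by
  unfold Pre_best_word_freqs; infer_instance

def pvWitness_best_word_freqs : List String := ["crane", "adieu", "salet"]

def Spec_best_word_freqs (word_list : List String) (out : String) : Prop := out = best_word_freqs_alt word_list
instance (word_list : List String) (out : String) : Decidable (Spec_best_word_freqs word_list out) := by unfold Spec_best_word_freqs; infer_instance

-- ===== CLAIM (what is proved, stated in full; the proofs are below) =====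
def Claim_equal_best_word_freqs : Prop := ∀ (word_list : List String), Dom_best_word_freqs word_list → Pre_best_word_freqs word_list → Spec_best_word_freqs word_list (best_word_freqs word_list)

-- ===== LEMMAS AND PROOFS =====

lemma pre_spec (word_list : List String) (h : Pre_best_word_freqs word_list) :
    ∀ w ∈ word_list, ∀ c ∈ w.toList, 'a' ≤ c ∧ c ≤ 'z' := by
  intro w hw c hc
  unfold Pre_best_word_freqs at h
  rw [List.all_eq_true] at h
  have hh := h w hw
  rw [List.all_eq_true] at hh
  simpa using hh c hc

-- Python str.count of a single character is List.count (specific bridge for these ports).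
lemma count_go_single (c : Char) : ∀ (cs : List Char) (fuel acc : Nat), cs.length ≤ fuel →
    PySem.Chars.count.go [c] fuel cs acc = acc + cs.count c := by
  intro cs
  induction cs with
  | nil => intro fuel acc h; cases fuel <;> simp [PySem.Chars.count.go]
  | cons h t ih =>
    intro fuel acc hf
    cases fuel with
    | zero => simp at hf
    | succ n =>
      have hn : t.length ≤ n := by simpa using hf
      simp only [PySem.Chars.count.go]
      by_cases hc : h = c
      · subst hc
        simp only [List.isPrefixOf, beq_self_eq_true, Bool.and_true, if_true,
          List.length_singleton, List.drop_one, List.tail_cons, ih n (acc+1) hn,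
          List.count_cons_self]
        omega
      · have hp : ([c].isPrefixOf (h :: t)) = false := by
          simp [List.isPrefixOf, Ne.symm hc]
        simp [hp, ih n acc hn, List.count_cons]
        exact hc

lemma count_single (w : String) (c : Char) :
    (PySem.Str.count w (String.ofList [c]) : Int) = (w.toList.count c : Int) := by
  have h1 : (String.ofList [c]).toList = [c] := by simp
  rw [PySem.Str.count_eq, h1]
  have hg := count_go_single c w.toList w.length 0 (by simp)
  simp [PySem.Chars.count, hg]

def allChars (wl : List String) : List Char := (wl.map String.toList).flatten

-- ---- B's frequency table ----
lemma altFreqs_go (wl : List String) (c : Char) : ∀ (f : PySem.Dict Char Int),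
    (wl.foldl (fun f word => word.toList.foldl (fun f c => f.insert c (f.getD c 0 + 1)) f) f).getD c 0
      = f.getD c 0 + ((allChars wl).count c : Int) := by
  induction wl with
  | nil => intro f; simp [allChars]
  | cons w t ih =>
    intro f
    simp only [List.foldl_cons, ih, PySem.Dict.getD_foldl_insert_add_one]
    have : allChars (w :: t) = w.toList ++ allChars t := by simp [allChars]
    rw [this, List.count_append]
    push_cast
    ring

lemma altFreqs_getD (wl : List String) (c : Char) :
    (altFreqs wl).getD c 0 = ((allChars wl).count c : Int) := by
  unfold altFreqs
  rw [altFreqs_go]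
  simp

-- ---- A's frequency table ----
def innerStep (char : Char) (f : PySem.Dict Char Int) (word : String) : PySem.Dict Char Int :=
  match f.get? char with
  | some v => f.insert char (v + (PySem.Str.count word (String.ofList [char]) : Int))
  | none   => f.insert char ((PySem.Str.count word (String.ofList [char]) : Int))

def outerStep (word_list : List String) (freqs : PySem.Dict Char Int) (char : Char) : PySem.Dict Char Int :=
  word_list.foldl (innerStep char) freqs

def cntIn (wl : List String) (c : Char) : Int := (wl.map (fun w => (w.toList.count c : Int))).sum

lemma get_freqs_as_chars (wl : List String) :
    get_freqs wl = "abcdefghijklmnopqrstuvwxyz".toList.foldl (outerStep wl) PySem.Dict.empty := rfl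

lemma inner_preserve (ch : Char) (wl : List String) (c : Char) (hne : c ≠ ch) :
    ∀ f : PySem.Dict Char Int, (wl.foldl (innerStep ch) f).get? c = f.get? c := by
  induction wl with
  | nil => intro f; rfl
  | cons w t ih =>
    intro f
    simp only [List.foldl_cons, ih]
    unfold innerStep
    cases f.get? ch <;> simp [PySem.Dict.get?_insert_of_ne _ _ hne]

lemma inner_some (ch : Char) : ∀ (wl : List String) (f : PySem.Dict Char Int) (a : Int),
    f.get? ch = some a → (wl.foldl (innerStep ch) f).get? ch = some (a + cntIn wl ch) := by
  intro wl
  induction wl with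
  | nil => intro f a h; simp [cntIn, h]
  | cons w t ih =>
    intro f a h
    simp only [List.foldl_cons]
    have hstep : innerStep ch f w = f.insert ch (a + (w.toList.count ch : Int)) := by
      unfold innerStep; rw [h, count_single]
    rw [hstep, ih _ _ (PySem.Dict.get?_insert_self _ _ _)]
    simp [cntIn]
    ring

lemma inner_start (ch : Char) (w : String) (t : List String) (f : PySem.Dict Char Int)
    (h : f.get? ch = none) :
    ((w :: t).foldl (innerStep ch) f).get? ch = some (cntIn (w :: t) ch) := by
  simp only [List.foldl_cons]
  have hstep : innerStep ch f w = f.insert ch ((w.toList.count ch : Int)) := by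
    unfold innerStep; rw [h, count_single]
  rw [hstep, inner_some ch t _ _ (PySem.Dict.get?_insert_self _ _ _)]
  simp [cntIn]

lemma chars_fold_preserve (wl : List String) (c : Char) : ∀ (chs : List Char), c ∉ chs →
    ∀ f : PySem.Dict Char Int, (chs.foldl (outerStep wl) f).get? c = f.get? c := by
  intro chs
  induction chs with
  | nil => intro _ f; rfl
  | cons ch t ih =>
    intro hmem f
    simp only [List.foldl_cons]
    rw [ih (fun h => hmem (List.mem_cons_of_mem _ h))]
    exact inner_preserve ch wl c (fun h => hmem (h ▸ List.mem_cons_self)) f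

lemma chars_fold_mem (w0 : String) (t0 : List String) (c : Char) :
    ∀ (chs : List Char), c ∈ chs → chs.Nodup →
    ∀ f : PySem.Dict Char Int, f.get? c = none →
    (chs.foldl (outerStep (w0 :: t0)) f).get? c = some (cntIn (w0 :: t0) c) := by
  intro chs
  induction chs with
  | nil => intro h; simp at h
  | cons ch t ih =>
    intro hmem hnd f hnone
    simp only [List.foldl_cons]
    by_cases hc : c = ch
    · subst hc
      rw [chars_fold_preserve _ _ t (List.nodup_cons.mp hnd).1]
      exact inner_start c w0 t0 f hnone
    · have hmem' : c ∈ t := by cases hmem with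
        | head => exact absurd rfl hc
        | tail _ h => exact h
      exact ih hmem' (List.Nodup.of_cons hnd) _
        ((inner_preserve ch _ c hc f).trans hnone)

lemma mem_alpha (c : Char) (h1 : 'a' ≤ c) (h2 : c ≤ 'z') :
    c ∈ "abcdefghijklmnopqrstuvwxyz".toList := by
  have hc : Char.ofNat c.toNat = c := Char.ofNat_toNat c
  have h97 : 97 ≤ c.toNat := h1
  have h122 : c.toNat ≤ 122 := h2
  rw [← hc]
  interval_cases h : c.toNat <;> decide

lemma cntIn_eq_count (wl : List String) (c : Char) :
    cntIn wl c = ((allChars wl).count c : Int) := by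
  induction wl with
  | nil => simp [cntIn, allChars]
  | cons w t ih =>
    have : allChars (w :: t) = w.toList ++ allChars t := by simp [allChars]
    simp [cntIn, this, List.count_append] at *
    omega

lemma get_freqs_get? (w0 : String) (t0 : List String) (c : Char)
    (h1 : 'a' ≤ c) (h2 : c ≤ 'z') :
    (get_freqs (w0 :: t0)).get? c = some ((allChars (w0 :: t0)).count c : Int) := by
  rw [get_freqs_as_chars, ← cntIn_eq_count]
  exact chars_fold_mem w0 t0 c _ (mem_alpha c h1 h2) (by decide) _ (PySem.Dict.get?_empty c)

-- ---- scores agree ----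
lemma opt_fold (fA : PySem.Dict Char Int) (g : Char → Int) :
    ∀ (cs : List Char), (∀ c ∈ cs, fA.get? c = some (g c)) → ∀ acc : Int,
    cs.foldl (fun s c => match s, fA.get? c with
      | some acc, some v => some (acc + v)
      | _, _ => none) (some acc) = some (cs.foldl (fun s c => s + g c) acc) := by
  intro cs
  induction cs with
  | nil => intro _ acc; rfl
  | cons c t ih =>
    intro h acc
    simp only [List.foldl_cons, h c List.mem_cons_self]
    exact ih (fun c hc => h c (List.mem_cons_of_mem _ hc)) _

lemma score_eq (wl : List String) (hpre : ∀ w ∈ wl, ∀ c ∈ w.toList, 'a' ≤ c ∧ c ≤ 'z') (w : String) (hw : w ∈ wl) :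
    score_word_freqs w (get_freqs wl) = some (altScore (altFreqs wl) w) := by
  obtain ⟨w0, t0, rfl⟩ : ∃ a t, wl = a :: t := by
    cases wl with
    | nil => simp at hw
    | cons a t => exact ⟨a, t, rfl⟩
  unfold score_word_freqs altScore
  have hg : ∀ c ∈ PySem.Set.ofList w.toList,
      (get_freqs (w0 :: t0)).get? c = some ((allChars (w0 :: t0)).count c : Int) := by
    intro c hc
    have hcw : c ∈ w.toList := (PySem.Set.mem_ofList _ _).mp hc
    obtain ⟨h1, h2⟩ := hpre w hw c hcw
    exact get_freqs_get? w0 t0 c h1 h2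
  rw [opt_fold _ _ _ hg 0]
  congr 1
  apply PySem.List.foldl_congr_mem
  intro acc c hc
  rw [altFreqs_getD]

-- ---- scores are nonnegative and vanish only on the empty word ----
lemma altScore_nonneg (fB : PySem.Dict Char Int) (hnn : ∀ c, 0 ≤ fB.getD c 0) (w : String) :
    0 ≤ altScore fB w := by
  unfold altScore
  rw [PySem.List.foldl_add]
  have : 0 ≤ ((PySem.Set.ofList w.toList).map (fun c => fB.getD c 0)).sum := by
    apply List.sum_nonneg
    intro x hx
    obtain ⟨c, _, rfl⟩ := List.mem_map.mp hx
    exact hnn c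
  omega

lemma altScore_pos (wl : List String) (w : String) (hw : w ∈ wl) (hne : w ≠ "") :
    0 < altScore (altFreqs wl) w := by
  unfold altScore
  rw [PySem.List.foldl_add]
  obtain ⟨c, cs, hwc⟩ : ∃ c cs, w.toList = c :: cs := by
    cases h : w.toList with
    | nil => exact absurd (String.toList_eq_nil_iff.mp h) hne
    | cons c cs => exact ⟨c, cs, rfl⟩
  have hcmem : c ∈ PySem.Set.ofList w.toList := by
    rw [PySem.Set.mem_ofList, hwc]; exact List.mem_cons_self
  have hterm : (1 : Int) ≤ (altFreqs wl).getD c 0 := by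
    rw [altFreqs_getD]
    have : 1 ≤ (allChars wl).count c := by
      apply List.count_pos_iff.mpr
      apply List.mem_flatten.mpr
      exact ⟨w.toList, List.mem_map.mpr ⟨w, hw, rfl⟩, by rw [hwc]; exact List.mem_cons_self⟩
    exact_mod_cast this
  have hsum : (1 : Int) ≤ ((PySem.Set.ofList w.toList).map (fun c => (altFreqs wl).getD c 0)).sum := by
    calc (1 : Int) ≤ (altFreqs wl).getD c 0 := hterm
    _ ≤ _ := by
        apply List.single_le_sum _ _ (List.mem_map.mpr ⟨c, hcmem, rfl⟩)
        intro x hx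
        obtain ⟨d, _, rfl⟩ := List.mem_map.mp hx
        rw [altFreqs_getD]; positivity
  omega

-- ---- A's scan over the pure score and B's sorted head coincide ----
lemma scanA (k : String → Int) : ∀ (xs : List String) (b : String),
    (xs.foldl (fun st x => if k x > st.2 then (x, k x) else st) (b, k b)).1
      = xs.foldl (fun bb x => if k bb < k x then x else bb) b := by
  intro xs
  induction xs with
  | nil => intro b; rfl
  | cons x t ih =>
    intro b
    simp only [List.foldl_cons, gt_iff_lt]
    by_cases h : k b < k x
    · simp [h, ih]
    · simp [h, ih]

lemma sortScan (k : String → Int) : ∀ (xs : List String) (b : String) (t : List String),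
    (xs.foldl (fun acc x => PySem.List.insertBy (fun a c => decide (k c < k a)) x acc) (b :: t)).head?
      = some (xs.foldl (fun bb x => if k bb < k x then x else bb) b) := by
  intro xs
  induction xs with
  | nil => intro b t; rfl
  | cons x s ih =>
    intro b t
    simp only [List.foldl_cons, PySem.List.insertBy]
    by_cases h : k b < k x
    · simp only [h, decide_true, if_true]
      rw [ih x (b :: t)]
    · simp only [h, decide_false, Bool.false_eq_true, if_false]
      rw [ih b _]

lemma head_sorted_rev (k : String → Int) (b : String) (t : List String) :
    (PySem.List.sorted (b :: t) k true).head?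
      = some (t.foldl (fun bb x => if k bb < k x then x else bb) b) := by
  rw [PySem.List.sorted_rev_eq_foldl_insertBy]
  simp only [List.foldl_cons]
  have : PySem.List.insertBy (fun a c => decide (k c < k a)) b [] = [b] := rfl
  rw [this]
  exact sortScan k t b []

theorem best_word_freqs_spec : Claim_equal_best_word_freqs := by
  unfold Claim_equal_best_word_freqs
  intro wl _ hpre0
  have hpre := pre_spec wl hpre0
  unfold Spec_best_word_freqs best_word_freqs best_word_freqs_alt
  cases wl with
  | nil => rfl
  | cons w0 t0 =>
    set k : String → Int := fun w => altScore (altFreqs (w0 :: t0)) w with hk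
    have hbody : (w0 :: t0).foldl (fun (st : String × Int) word =>
          match score_word_freqs word (get_freqs (w0 :: t0)) with
          | some score => if score > st.2 then (word, score) else st
          | none => st) ("", 0)
        = (w0 :: t0).foldl (fun (st : String × Int) word =>
            if k word > st.2 then (word, k word) else st) ("", 0) := by
      apply PySem.List.foldl_congr_mem
      intro acc x hx
      rw [score_eq (w0 :: t0) hpre x hx]
    simp only [hbody]
    -- first step of the scan leaves the state at (w0, k w0)
    have hnn : ∀ c, 0 ≤ (altFreqs (w0 :: t0)).getD c 0 := by
      intro c; rw [altFreqs_getD]; positivity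
    have hfirst : ((if k w0 > (0:Int) then (w0, k w0) else (("", 0) : String × Int)))
        = (w0, k w0) := by
      by_cases h : k w0 > 0
      · simp [h]
      · have h0 : k w0 = 0 := le_antisymm (by omega) (altScore_nonneg _ hnn w0)
        have hw0 : w0 = "" := by
          by_contra hne
          exact absurd (altScore_pos (w0 :: t0) w0 List.mem_cons_self hne) (by rw [← hk] at *; omega)
        rw [if_neg h]
        have hkz : k "" = 0 := hw0 ▸ h0
        rw [hw0, hkz]
    simp only [List.foldl_cons, hfirst]
    rw [scanA k t0 w0]
    have hhead := head_sorted_rev k w0 t0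
    cases hs : PySem.List.sorted (w0 :: t0) k true with
    | nil => rw [hs] at hhead; simp at hhead
    | cons m r =>
      rw [hs] at hhead
      simp only [List.head?_cons, Option.some.injEq] at hhead
      simp [hk] at hhead ⊢
      exact hhead.symm
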